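-- pv_equiv track=rewrite | github.com/tvquizphd/tic-kan-toe | util/search_index.py | arpabet_to_arpepet
-- ===== SOURCE A (Python) =====
-- def arpabet_to_arpepet(arpepet_table, arpa_list):
--     converter = {
--         arpa_key: arpe_key
--         for arpe_key, arpa_str in (arpepet_table).items()
--         for arpa_key in arpa_str.split(' ')
--     }
--     for arpa_phone in arpa_list:
--         arpa = "".join(
--             x for x in arpa_phone if x.isalpha()
--         )
--         # Handle non-standard arpabet
--         if arpa not in converter:
--             yield from ({
--                 'EA': ['E', 'R'],
--                 'IA': ['I', 'R']
--             }).get(arpa, list(arpa))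
--             continue
--         yield converter[arpa]
-- ===== SOURCE B (Python) =====
-- def arpabet_to_arpepet(arpepet_table, arpa_list):
--     for arpa_phone in arpa_list:
--         arpa = ''.join(c for c in arpa_phone if c.isalpha())
--         found = None
--         for arpe_key, arpa_str in arpepet_table.items():
--             if arpa in arpa_str.split(' '):
--                 found = arpe_key
--         if found is None:
--             yield from {'EA': ['E', 'R'], 'IA': ['I', 'R']}.get(arpa, list(arpa))
--         else:
--             yield found
-- ===== Notes on version B (the rewrite author's own statement) =====
-- stated objective: alternative
-- what changed: Drops the precomputed converter dict: for each phone B scans the table items directly, keeping the last entry whose split phone list contains the stripped phone (last-wins matches the dict-comprehension override), with the same special-case fallback.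
import Mathlib
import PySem

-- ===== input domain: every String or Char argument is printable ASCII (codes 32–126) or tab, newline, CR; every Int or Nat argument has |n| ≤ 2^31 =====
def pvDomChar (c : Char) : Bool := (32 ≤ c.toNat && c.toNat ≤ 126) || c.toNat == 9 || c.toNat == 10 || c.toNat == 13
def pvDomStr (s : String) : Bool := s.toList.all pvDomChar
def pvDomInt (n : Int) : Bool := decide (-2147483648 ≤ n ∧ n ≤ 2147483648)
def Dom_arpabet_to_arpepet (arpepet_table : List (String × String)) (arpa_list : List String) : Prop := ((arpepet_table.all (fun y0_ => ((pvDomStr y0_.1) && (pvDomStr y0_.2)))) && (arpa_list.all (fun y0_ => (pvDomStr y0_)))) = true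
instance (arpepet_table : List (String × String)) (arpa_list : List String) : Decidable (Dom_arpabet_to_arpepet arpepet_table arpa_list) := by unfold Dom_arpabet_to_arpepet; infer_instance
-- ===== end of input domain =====

-- B drops A's precomputed converter dict and instead, per phone, scans the table for the
-- last entry whose phone list contains the stripped phone (objective: alternative, same result).
-- Both ports view the dict parameter through (PySem.Dict.ofList …).items, since the Python
-- argument is a dict (duplicate keys in the assoc list collapse exactly as dict(pairs) does).

-- ===== PORT A =====
-- body of A's for-loop: strip non-alpha chars, look the result up in the converter,
-- else fall back to the special-case dict / the list of single characters
def pvEmitA (converter : PySem.Dict (List Char) String) (phone : String) : List String :=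
  let arpa := phone.toList.filter PySem.Chars.isalpha
  match converter.get? arpa with
  | none => if arpa = ['E','A'] then ["E", "R"]
            else if arpa = ['I','A'] then ["I", "R"]
            else arpa.map (fun c => String.ofList [c])
  | some v => [v]

def arpabet_to_arpepet (arpepet_table : List (String × String)) (arpa_list : List String) : List String :=
  let items := (PySem.Dict.ofList arpepet_table).items
  -- the dict comprehension: for each (arpe_key, arpa_str) item, insert every word of
  -- arpa_str.split(' ') as a key mapping to arpe_key (later insertions overwrite)
  let converter : PySem.Dict (List Char) String :=
    items.foldl (fun d p => (PySem.Chars.splitOn p.2.toList [' ']).foldl (fun d k => d.insert k p.1) d) PySem.Dict.empty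
  arpa_list.foldl (fun acc phone => acc ++ pvEmitA converter phone) []

-- ===== PORT B =====
-- inner for-loop of B: `found` starts as None and keeps the LAST matching entry's key
def pvScanB (arpa : List Char) (items : List (String × String)) : Option String :=
  items.foldl (fun found p => if arpa ∈ PySem.Chars.splitOn p.2.toList [' '] then some p.1 else found) none

def pvEmitB (arpa : List Char) (found : Option String) : List String :=
  match found with
  | none => if arpa = ['E','A'] then ["E", "R"]
            else if arpa = ['I','A'] then ["I", "R"]
            else arpa.map (fun c => String.ofList [c])
  | some v => [v]

def pvGoB (items : List (String × String)) : List String → List String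
  | [] => []
  | phone :: rest =>
      pvEmitB (phone.toList.filter PySem.Chars.isalpha)
              (pvScanB (phone.toList.filter PySem.Chars.isalpha) items)
        ++ pvGoB items rest

def arpabet_to_arpepet_alt (arpepet_table : List (String × String)) (arpa_list : List String) : List String :=
  pvGoB (PySem.Dict.ofList arpepet_table).items arpa_list

-- ===== PRECONDITION & SPEC =====
def Spec_arpabet_to_arpepet (arpepet_table : List (String × String)) (arpa_list : List String) (out : List String) : Prop := out = arpabet_to_arpepet_alt arpepet_table arpa_list
instance (arpepet_table : List (String × String)) (arpa_list : List String) (out : List String) : Decidable (Spec_arpabet_to_arpepet arpepet_table arpa_list out) := by unfold Spec_arpabet_to_arpepet; infer_instance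

-- ===== CLAIM (what is proved, stated in full; the proofs are below) =====
def Claim_equal_arpabet_to_arpepet : Prop := ∀ (arpepet_table : List (String × String)) (arpa_list : List String), Dom_arpabet_to_arpepet arpepet_table arpa_list → Spec_arpabet_to_arpepet arpepet_table arpa_list (arpabet_to_arpepet arpepet_table arpa_list)

-- ===== LEMMAS AND PROOFS =====

-- inserting one value v under every key in `keys`: lookup hits v iff the key was inserted
theorem pv_foldl_insert_get? (keys : List (List Char)) (v : String) :
    ∀ (d : PySem.Dict (List Char) String) (a : List Char),
      (keys.foldl (fun d k => d.insert k v) d).get? a = if a ∈ keys then some v else d.get? a := by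
  induction keys with
  | nil => intro d a; simp
  | cons k ks ih =>
      intro d a
      simp only [List.foldl_cons, ih, List.mem_cons]
      by_cases h : a ∈ ks
      · simp [h]
      · by_cases hk : a = k
        · simp [hk, PySem.Dict.get?_insert_self]
        · simp [h, hk, PySem.Dict.get?_insert_of_ne _ _ hk]

-- A's converter lookup equals B's last-match scan (generalized over the starting dict)
theorem pv_converter_eq_scan (items : List (String × String)) :
    ∀ (d : PySem.Dict (List Char) String) (a : List Char),
      (items.foldl (fun d p => (PySem.Chars.splitOn p.2.toList [' ']).foldl (fun d k => d.insert k p.1) d) d).get? a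
        = items.foldl (fun found p => if a ∈ PySem.Chars.splitOn p.2.toList [' '] then some p.1 else found) (d.get? a) := by
  induction items with
  | nil => intro d a; rfl
  | cons p ps ih =>
      intro d a
      simp only [List.foldl_cons, ih, pv_foldl_insert_get?]

theorem pv_emit_eq (items : List (String × String)) (phone : String) :
    pvEmitA (items.foldl (fun d p => (PySem.Chars.splitOn p.2.toList [' ']).foldl (fun d k => d.insert k p.1) d) PySem.Dict.empty) phone
      = pvEmitB (phone.toList.filter PySem.Chars.isalpha) (pvScanB (phone.toList.filter PySem.Chars.isalpha) items) := by
  simp only [pvEmitA, pvEmitB, pvScanB, pv_converter_eq_scan, PySem.Dict.get?_empty]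

theorem pv_goB_eq_flatMap (items : List (String × String)) (l : List String) :
    pvGoB items l = l.flatMap (fun phone =>
      pvEmitB (phone.toList.filter PySem.Chars.isalpha) (pvScanB (phone.toList.filter PySem.Chars.isalpha) items)) := by
  induction l with
  | nil => rfl
  | cons x xs ih => simp [pvGoB, ih]

-- ===== VERDICT (by name: the statement is the Claim_ definition above) =====
theorem arpabet_to_arpepet_spec : Claim_equal_arpabet_to_arpepet := by
  intro arpepet_table arpa_list _
  unfold Spec_arpabet_to_arpepet arpabet_to_arpepet arpabet_to_arpepet_alt
  rw [PySem.List.foldl_append_eq_flatMap, pv_goB_eq_flatMap]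
  simp only [List.nil_append]
  exact List.flatMap_congr (fun phone _ => pv_emit_eq _ phone)
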